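-- pv_equiv track=rewrite | github.com/ericka-cespedes/IntroProgrammingPY | Practica5.py | multdigAux
-- ===== SOURCE A (Python) =====
-- def multdigAux(num1, num2):
--     if num1==0 and num2==0:
--         return 0
--     else:
--         ultimoDigito1=num1%10
--         ultimoDigito2=num2%10
--         producto = ultimoDigito1 * ultimoDigito2
--         if producto>9:
--             producto%=10
--         return producto + 10*multdigAux(num1//10, num2//10)
-- ===== SOURCE B (Python) =====
-- def multdigAux(num1, num2):
--     # Pass 1: collect digit-wise products mod 10, least significant first.
--     digits = []
--     while num1 or num2:
--         digits.append((num1 % 10) * (num2 % 10) % 10)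
--         num1 //= 10
--         num2 //= 10
--     # Pass 2: Horner evaluation, most significant first.
--     result = 0
--     for d in reversed(digits):
--         result = result * 10 + d
--     return result
-- ===== Notes on version B (the rewrite author's own statement) =====
-- stated objective: alternative
-- what changed: Two staged passes instead of A's place-value recursion: first collect the digit-wise products mod 10 into a list, then evaluate it most-significant-first with a Horner fold; the conditional '%= 10' branch disappears (an unconditional mod 10 is equal for nonnegative operands).
import Mathlib
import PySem

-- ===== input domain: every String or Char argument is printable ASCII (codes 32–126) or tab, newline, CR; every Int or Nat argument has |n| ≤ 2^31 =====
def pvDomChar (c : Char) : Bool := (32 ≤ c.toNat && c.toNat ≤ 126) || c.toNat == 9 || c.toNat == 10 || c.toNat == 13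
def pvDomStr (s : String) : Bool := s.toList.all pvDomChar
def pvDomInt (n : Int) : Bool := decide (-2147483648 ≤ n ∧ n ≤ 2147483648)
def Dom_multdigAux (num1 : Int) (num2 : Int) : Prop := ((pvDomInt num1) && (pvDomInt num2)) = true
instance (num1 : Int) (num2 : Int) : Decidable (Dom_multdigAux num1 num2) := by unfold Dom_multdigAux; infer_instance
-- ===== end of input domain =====

-- B replaces A's place-value recursion by two staged passes (collect the digit products mod 10, then a Horner fold over the reversed list); return values only.

-- ===== PORT A =====
-- A's recursion does not terminate for negative arguments (Python hits RecursionError there;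
-- such inputs are excluded by Pre_), so the port carries a fuel counter: 64 steps cover every
-- nonnegative input of Dom (≤ 2^31 < 10^10 needs at most 11 steps).
def multdigAuxFuel : Nat → Int → Int → Int
  | 0, _, _ => 0
  | n + 1, num1, num2 =>
    if num1 = 0 ∧ num2 = 0 then 0
    else
      let ultimoDigito1 := PySem.Int.mod num1 10
      let ultimoDigito2 := PySem.Int.mod num2 10
      let producto := ultimoDigito1 * ultimoDigito2
      let producto := if producto > 9 then PySem.Int.mod producto 10 else producto
      producto + 10 * multdigAuxFuel n (PySem.Int.floordiv num1 10) (PySem.Int.floordiv num2 10)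

def multdigAux (num1 : Int) (num2 : Int) : Int := multdigAuxFuel 64 num1 num2

-- ===== PORT B =====
-- Pass 1 of Source B: the while loop collecting digit products mod 10 (LSB first), fuel-bounded.
def collectDigits : Nat → Int → Int → List Int
  | 0, _, _ => []
  | n + 1, num1, num2 =>
    if num1 ≠ 0 ∨ num2 ≠ 0 then
      PySem.Int.mod ((PySem.Int.mod num1 10) * (PySem.Int.mod num2 10)) 10 ::
        collectDigits n (PySem.Int.floordiv num1 10) (PySem.Int.floordiv num2 10)
    else []

-- Pass 2 of Source B: 'for d in reversed(digits): result = result * 10 + d'.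
def multdigAux_alt (num1 : Int) (num2 : Int) : Int :=
  (collectDigits 64 num1 num2).reverse.foldl (fun result d => result * 10 + d) 0

-- ===== PRECONDITION & SPEC =====
-- Pre_ excludes negative arguments: there Python A recurses forever (RecursionError) and Python B's while loop never terminates.
def Pre_multdigAux (num1 : Int) (num2 : Int) : Prop := 0 ≤ num1 ∧ 0 ≤ num2
instance (num1 : Int) (num2 : Int) : Decidable (Pre_multdigAux num1 num2) := by unfold Pre_multdigAux; infer_instance
def pvWitness_multdigAux : Int × Int := (123, 45)

def Spec_multdigAux (num1 : Int) (num2 : Int) (out : Int) : Prop := out = multdigAux_alt num1 num2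
instance (num1 : Int) (num2 : Int) (out : Int) : Decidable (Spec_multdigAux num1 num2 out) := by unfold Spec_multdigAux; infer_instance

-- ===== CLAIM (what is proved, stated in full; the proofs are below) =====
def Claim_equal_multdigAux : Prop := ∀ (num1 : Int) (num2 : Int), Dom_multdigAux num1 num2 → Pre_multdigAux num1 num2 → Spec_multdigAux num1 num2 (multdigAux num1 num2)

-- ===== LEMMAS AND PROOFS =====
-- LSB-first value of a digit list.
def lsbVal : List Int → Int
  | [] => 0
  | d :: ds => d + 10 * lsbVal ds

-- A's branch 'if producto>9 then producto%10' equals an unconditional mod 10 (digit products lie in [0,81]).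
theorem branch_eq_mod (a b : Int) :
    (if (PySem.Int.mod a 10) * (PySem.Int.mod b 10) > 9
      then PySem.Int.mod ((PySem.Int.mod a 10) * (PySem.Int.mod b 10)) 10
      else (PySem.Int.mod a 10) * (PySem.Int.mod b 10))
    = PySem.Int.mod ((PySem.Int.mod a 10) * (PySem.Int.mod b 10)) 10 := by
  have ha0 := PySem.Int.mod_nonneg a (b := 10) (by norm_num)
  have hb0 := PySem.Int.mod_nonneg b (b := 10) (by norm_num)
  have hp0 : 0 ≤ (PySem.Int.mod a 10) * (PySem.Int.mod b 10) := mul_nonneg ha0 hb0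
  split_ifs with h
  · rfl
  · have hlt : (PySem.Int.mod a 10) * (PySem.Int.mod b 10) < 10 := by omega
    have h10 : PySem.Int.mod ((PySem.Int.mod a 10) * (PySem.Int.mod b 10)) 10
        = ((PySem.Int.mod a 10) * (PySem.Int.mod b 10)) % 10 :=
      PySem.Int.mod_eq_emod_of_pos (by norm_num)
    rw [h10]
    exact (Int.emod_eq_of_lt hp0 hlt).symm

-- A's recursion computes the LSB-first value of B's digit list, with equal fuel.
theorem fuel_eq_lsbVal (n : Nat) : ∀ (num1 num2 : Int),
    multdigAuxFuel n num1 num2 = lsbVal (collectDigits n num1 num2) := by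
  induction n with
  | zero => intro num1 num2; simp [multdigAuxFuel, collectDigits, lsbVal]
  | succ n ih =>
    intro num1 num2
    simp only [multdigAuxFuel, collectDigits]
    by_cases h : num1 = 0 ∧ num2 = 0
    · simp [h, lsbVal]
    · have h' : num1 ≠ 0 ∨ num2 ≠ 0 := by tauto
      rw [if_neg h, if_pos h', branch_eq_mod num1 num2]
      simp only [lsbVal, ih]

-- The Horner fold over the reversed list computes the LSB-first value (accumulator-generalised).
theorem foldl_reverse_eq_lsbVal (ds : List Int) : ∀ (r : Int),
    ds.reverse.foldl (fun result d => result * 10 + d) r = r * 10 ^ ds.length + lsbVal ds := by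
  induction ds with
  | nil => intro r; simp [lsbVal]
  | cons d ds ih =>
    intro r
    simp only [List.reverse_cons, List.foldl_append, List.foldl_cons, List.foldl_nil, ih, lsbVal,
      List.length_cons]
    ring

-- ===== VERDICT (by name: the statement is the Claim_ definition above) =====
theorem multdigAux_spec : Claim_equal_multdigAux := by
  intro num1 num2 _ _
  unfold Spec_multdigAux multdigAux multdigAux_alt
  rw [foldl_reverse_eq_lsbVal, fuel_eq_lsbVal]
  ring
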